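-- pv_equiv track=rewrite | github.com/DomainProject/apo | model/model.py | assignment_renaming
-- ===== SOURCE A (Python) =====
-- def assignment_renaming(assignment):
--   new_assignment = []
--   translation = {}
--   used_labels = set([])
--
--   for i in assignment:
--     if i not in translation:
--       dev = i.split('_')[0]
--       count = 0
--       while True:
--         new_label = f"{dev}_{count}"
--         if new_label not in used_labels:
--           used_labels.add(new_label)
--           translation[i] = new_label
--           break
--         count += 1
--     new_assignment += [translation[i]]
--   return new_assignment
-- ===== SOURCE B (Python) =====
-- def assignment_renaming(assignment):
--   # Build the full relabeling table over the distinct items first, then map.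
--   translation = {}
--   counters = {}
--   for i in dict.fromkeys(assignment):
--     dev = i.split('_')[0]
--     n = counters.get(dev, 0)
--     translation[i] = f"{dev}_{n}"
--     counters[dev] = n + 1
--   return [translation[i] for i in assignment]
-- ===== Notes on version B (the rewrite author's own statement) =====
-- stated objective: simpler
-- what changed: B deduplicates the input (dict.fromkeys), builds the whole translation table in one pass keeping a per-prefix counter dict instead of A's global used-label set with an inner smallest-free-label scan, and then maps the input through the table in a separate pass.
import Mathlib
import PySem

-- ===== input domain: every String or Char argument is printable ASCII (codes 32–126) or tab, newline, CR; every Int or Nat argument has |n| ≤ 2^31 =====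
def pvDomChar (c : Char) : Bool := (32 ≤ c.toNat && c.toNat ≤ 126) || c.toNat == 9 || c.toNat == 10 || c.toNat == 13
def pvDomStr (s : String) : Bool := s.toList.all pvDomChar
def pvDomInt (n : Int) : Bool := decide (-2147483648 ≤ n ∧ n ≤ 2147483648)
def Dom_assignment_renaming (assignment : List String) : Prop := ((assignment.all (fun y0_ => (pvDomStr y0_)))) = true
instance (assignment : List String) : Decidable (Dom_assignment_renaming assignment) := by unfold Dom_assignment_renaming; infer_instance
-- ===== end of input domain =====

-- B builds the whole translation table over the deduplicated input with a per-prefix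
-- counter dict, then maps; A interleaves a single pass with an inner smallest-free-label
-- scan over a global used-label set.  Objective: simpler.

-- ===== PORT A =====
-- i.split('_')[0]  (split with a nonempty separator always returns a nonempty list,
-- so the Python indexing never raises; headD is exact here)
def pvDev (i : String) : String := ((PySem.Str.split? i "_").getD []).headD ""

-- f"{dev}_{count}"
def pvEnc (dev : String) (count : Int) : String := dev ++ "_" ++ PySem.Int.toStr count

-- A's inner `while True` scan; fuel (len(used_labels)+1 at the call site) only makes the
-- same computation total — the scan always finds a free label within that many steps.
def pvFindFree (used : PySem.Set String) (dev : String) (count : Int) : Nat → String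
  | 0 => pvEnc dev count
  | fuel + 1 =>
    if PySem.Set.contains used (pvEnc dev count) then pvFindFree used dev (count + 1) fuel
    else pvEnc dev count

-- the body of A's `for i in assignment` loop, state (new_assignment, translation, used_labels)
def pvStepA (st : List String × PySem.Dict String String × PySem.Set String) (i : String) :
    List String × PySem.Dict String String × PySem.Set String :=
  if st.2.1.contains i then
    (st.1 ++ [st.2.1.getD i ""], st.2.1, st.2.2)
  else
    let dev := pvDev i
    let newLabel := pvFindFree st.2.2 dev 0 (st.2.2.length + 1)
    (st.1 ++ [newLabel], st.2.1.insert i newLabel, PySem.Set.add st.2.2 newLabel)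

def assignment_renaming (assignment : List String) : List String :=
  (assignment.foldl pvStepA ([], PySem.Dict.empty, PySem.Set.empty)).1

-- ===== PORT B =====
-- body of B's `for i in dict.fromkeys(assignment)` loop, state (translation, counters)
def pvStepB (tc : PySem.Dict String String × PySem.Dict String Int) (i : String) :
    PySem.Dict String String × PySem.Dict String Int :=
  let dev := pvDev i
  let n := tc.2.getD dev 0
  (tc.1.insert i (pvEnc dev n), tc.2.insert dev (n + 1))

-- the table-building pass over the deduplicated input
def pvBuild (m : List String) : PySem.Dict String String × PySem.Dict String Int :=
  m.foldl pvStepB (PySem.Dict.empty, PySem.Dict.empty)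

def assignment_renaming_alt (assignment : List String) : List String :=
  let tc := pvBuild (PySem.List.dedup assignment)
  assignment.map (fun i => tc.1.getD i "")

-- ===== PRECONDITION & SPEC =====
def Spec_assignment_renaming (assignment : List String) (out : List String) : Prop := out = assignment_renaming_alt assignment
instance (assignment : List String) (out : List String) : Decidable (Spec_assignment_renaming assignment out) := by unfold Spec_assignment_renaming; infer_instance

-- ===== CLAIM (what is proved, stated in full; the proofs are below) =====
def Claim_equal_assignment_renaming : Prop := ∀ (assignment : List String), Dom_assignment_renaming assignment → Spec_assignment_renaming assignment (assignment_renaming assignment)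

-- ===== LEMMAS AND PROOFS =====

def pvRep (n : ℕ) : List Char :=
  if _h : n = 0 then [] else pvRep (n / 10) ++ [Nat.digitChar (n % 10)]
decreasing_by exact Nat.div_lt_self (Nat.pos_of_ne_zero _h) (by norm_num)

theorem pvRep_zero : pvRep 0 = [] := by rw [pvRep]; simp

theorem pvRep_pos (n : ℕ) (h : n ≠ 0) :
    pvRep n = pvRep (n / 10) ++ [Nat.digitChar (n % 10)] := by
  rw [pvRep, dif_neg h]

theorem pvRep_eq_nil_iff (n : ℕ) : pvRep n = [] ↔ n = 0 := by
  constructor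
  · intro h
    by_contra hn
    rw [pvRep_pos n hn] at h
    simp at h
  · intro h; subst h; exact pvRep_zero

theorem pv_toDigitsCore_eq (fuel : ℕ) : ∀ (n : ℕ) (ds : List Char), n ≤ fuel →
    Nat.toDigitsCore 10 (fuel + 1) n ds = (if n = 0 then ['0'] else pvRep n) ++ ds := by
  induction fuel with
  | zero =>
    intro n ds hn
    interval_cases n
    simp [Nat.toDigitsCore]
    decide
  | succ fuel ih =>
    intro n ds hn
    have step : Nat.toDigitsCore 10 (fuel + 1 + 1) n ds =
        if n / 10 = 0 then (n % 10).digitChar :: ds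
        else Nat.toDigitsCore 10 (fuel + 1) (n / 10) ((n % 10).digitChar :: ds) := rfl
    by_cases h0 : n = 0
    · subst h0; rw [step]; simp; decide
    · have hlt : n / 10 < n := Nat.div_lt_self (Nat.pos_of_ne_zero h0) (by norm_num)
      rw [step, if_neg h0, pvRep_pos n h0]
      by_cases hq : n / 10 = 0
      · rw [if_pos hq, hq, pvRep_zero]
        simp
      · rw [if_neg hq, ih (n / 10) _ (by omega), if_neg hq]
        simp

theorem pv_toDigits_eq (n : ℕ) : Nat.toDigits 10 n = if n = 0 then ['0'] else pvRep n := by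
  have h := pv_toDigitsCore_eq n n [] le_rfl
  rw [List.append_nil] at h
  exact h

theorem pv_digitChar_inj (a b : ℕ) (ha : a < 10) (hb : b < 10)
    (h : Nat.digitChar a = Nat.digitChar b) : a = b := by
  interval_cases a <;> interval_cases b <;> first | rfl | (exact absurd h (by decide))

theorem pvRep_inj (a : ℕ) : ∀ b : ℕ, a ≠ 0 → b ≠ 0 → pvRep a = pvRep b → a = b := by
  induction a using Nat.strong_induction_on with
  | _ a ih =>
    intro b ha hb h
    rw [pvRep_pos a ha, pvRep_pos b hb, ← List.concat_eq_append, ← List.concat_eq_append,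
      List.concat_inj] at h
    obtain ⟨h1, h2⟩ := h
    have hmod : a % 10 = b % 10 :=
      pv_digitChar_inj _ _ (Nat.mod_lt _ (by norm_num)) (Nat.mod_lt _ (by norm_num)) h2
    have hdiv : a / 10 = b / 10 := by
      by_cases hq : a / 10 = 0
      · rw [hq, pvRep_zero] at h1
        have := (pvRep_eq_nil_iff (b / 10)).mp h1.symm
        omega
      · by_cases hq' : b / 10 = 0
        · exfalso
          rw [hq', pvRep_zero] at h1
          exact hq ((pvRep_eq_nil_iff _).mp h1)
        · exact ih (a / 10) (Nat.div_lt_self (Nat.pos_of_ne_zero ha) (by norm_num)) _ hq hq' h1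
    omega

theorem pvRep0_inj (a b : ℕ)
    (h : (if a = 0 then ['0'] else pvRep a) = (if b = 0 then ['0'] else pvRep b)) : a = b := by
  by_cases ha : a = 0 <;> by_cases hb : b = 0
  · omega
  · exfalso
    rw [if_pos ha, if_neg hb, pvRep_pos b hb] at h
    have h' : ([] : List Char).concat '0' = (pvRep (b / 10)).concat (Nat.digitChar (b % 10)) := by
      simpa [List.concat_eq_append] using h
    rw [List.concat_inj] at h'
    obtain ⟨h1, h2⟩ := h'
    have hb1 : b % 10 = 0 := (pv_digitChar_inj (b % 10) 0 (Nat.mod_lt _ (by norm_num)) (by norm_num)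
      (h2.symm.trans (by decide)))
    have hb2 : b / 10 = 0 := (pvRep_eq_nil_iff _).mp h1.symm
    omega
  · exfalso
    rw [if_neg ha, if_pos hb, pvRep_pos a ha] at h
    have h' : (pvRep (a / 10)).concat (Nat.digitChar (a % 10)) = ([] : List Char).concat '0' := by
      simpa [List.concat_eq_append] using h
    rw [List.concat_inj] at h'
    obtain ⟨h1, h2⟩ := h'
    have ha1 : a % 10 = 0 := (pv_digitChar_inj (a % 10) 0 (Nat.mod_lt _ (by norm_num)) (by norm_num)
      (h2.trans (by decide)))
    have ha2 : a / 10 = 0 := (pvRep_eq_nil_iff _).mp h1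
    omega
  · rw [if_neg ha, if_neg hb] at h
    exact pvRep_inj a b ha hb h

theorem pv_toStr_chars (a : ℕ) :
    (PySem.Int.toStr (a : Int)).toList = (if a = 0 then ['0'] else pvRep a) := by
  rw [PySem.Int.toList_toStr]
  unfold PySem.Int.toChars
  rw [if_neg (by omega)]
  simpa using pv_toDigits_eq a

theorem pv_toStr_nat_inj (a b : ℕ) (h : PySem.Int.toStr (a : Int) = PySem.Int.toStr (b : Int)) :
    a = b := by
  apply pvRep0_inj
  rw [← pv_toStr_chars, ← pv_toStr_chars, h]

theorem pv_mid_inj (l1 : List Char) : ∀ (l2 t1 t2 : List Char), '_' ∉ l1 → '_' ∉ l2 →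
    l1 ++ '_' :: t1 = l2 ++ '_' :: t2 → l1 = l2 ∧ t1 = t2 := by
  induction l1 with
  | nil =>
    intro l2 t1 t2 _ h2 h
    cases l2 with
    | nil => simp_all
    | cons c l2' =>
      simp only [List.nil_append, List.cons_append, List.cons.injEq] at h
      exact absurd (show '_' ∈ c :: l2' by rw [← h.1]; exact List.mem_cons_self ..) h2
  | cons c l1' ih =>
    intro l2 t1 t2 h1 h2 h
    cases l2 with
    | nil =>
      simp only [List.cons_append, List.nil_append, List.cons.injEq] at h
      exact absurd (show '_' ∈ c :: l1' by rw [h.1]; exact List.mem_cons_self ..) h1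
    | cons c2 l2' =>
      simp only [List.cons_append, List.cons.injEq] at h
      obtain ⟨hc, hrest⟩ := h
      have := ih l2' t1 t2 (fun hm => h1 (List.mem_cons_of_mem _ hm))
        (fun hm => h2 (List.mem_cons_of_mem _ hm)) hrest
      exact ⟨by rw [hc, this.1], this.2⟩

theorem pvEnc_toList (d : String) (n : Int) :
    (pvEnc d n).toList = d.toList ++ '_' :: (PySem.Int.toStr n).toList := by
  unfold pvEnc
  rw [String.toList_append, String.toList_append, List.append_assoc]
  congr 1

theorem pvEnc_inj (d1 d2 : String) (n1 n2 : ℕ) (h1 : '_' ∉ d1.toList) (h2 : '_' ∉ d2.toList)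
    (h : pvEnc d1 (n1 : Int) = pvEnc d2 (n2 : Int)) : d1 = d2 ∧ n1 = n2 := by
  have hl : (pvEnc d1 (n1 : Int)).toList = (pvEnc d2 (n2 : Int)).toList := by rw [h]
  rw [pvEnc_toList, pvEnc_toList] at hl
  obtain ⟨hd, ht⟩ := pv_mid_inj _ _ _ _ h1 h2 hl
  exact ⟨String.toList_inj.mp hd, pv_toStr_nat_inj _ _ (String.toList_inj.mp ht)⟩

theorem pv_go_acc (sep : List Char) (fuel : ℕ) : ∀ (l cur : List Char) (acc : List (List Char)),
    PySem.Chars.splitOn.go sep fuel l cur acc = acc.reverse ++ PySem.Chars.splitOn.go sep fuel l cur [] := by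
  induction fuel with
  | zero =>
    intro l cur acc
    simp [PySem.Chars.splitOn.go]
  | succ fuel ih =>
    intro l cur acc
    cases l with
    | nil => simp [PySem.Chars.splitOn.go]
    | cons c rest =>
      have step : ∀ (cur' : List Char) (acc' : List (List Char)),
          PySem.Chars.splitOn.go sep (fuel + 1) (c :: rest) cur' acc' =
            if sep.isPrefixOf (c :: rest) then
              PySem.Chars.splitOn.go sep fuel (List.drop sep.length (c :: rest)) [] (cur'.reverse :: acc')
            else PySem.Chars.splitOn.go sep fuel rest (c :: cur') acc' := fun _ _ => rfl
      rw [step, step]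
      by_cases hp : sep.isPrefixOf (c :: rest)
      · rw [if_pos hp, if_pos hp, ih _ _ (cur.reverse :: acc), ih _ _ ([cur.reverse])]
        simp
      · rw [if_neg hp, if_neg hp, ih _ _ acc]

theorem pv_go_head (fuel : ℕ) : ∀ (l cur : List Char), l.length < fuel →
    (PySem.Chars.splitOn.go ['_'] fuel l cur []).head? =
      some (cur.reverse ++ l.takeWhile (fun c => c != '_')) := by
  induction fuel with
  | zero => intro l cur h; omega
  | succ fuel ih =>
    intro l cur h
    cases l with
    | nil => simp [PySem.Chars.splitOn.go]
    | cons c rest =>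
      have step : PySem.Chars.splitOn.go ['_'] (fuel + 1) (c :: rest) cur [] =
          if ['_'].isPrefixOf (c :: rest) then
            PySem.Chars.splitOn.go ['_'] fuel (List.drop 1 (c :: rest)) [] [cur.reverse]
          else PySem.Chars.splitOn.go ['_'] fuel rest (c :: cur) [] := rfl
      rw [step]
      by_cases hc : c = '_'
      · rw [if_pos (by simp [List.isPrefixOf, hc])]
        rw [pv_go_acc ['_'] fuel (List.drop 1 (c :: rest)) [] [cur.reverse]]
        simp [hc]
      · rw [if_neg (by simp [List.isPrefixOf]; exact fun he => hc he.symm)]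
        rw [ih rest (c :: cur) (by simpa using Nat.lt_of_succ_lt_succ h)]
        simp [hc]

theorem pvDev_eq (s : String) :
    pvDev s = String.ofList (s.toList.takeWhile (fun c => c != '_')) := by
  unfold pvDev
  have hsep : PySem.Str.split? s "_" =
      some ((PySem.Chars.splitOn s.toList ['_']).map String.ofList) := rfl
  rw [hsep]
  have hgo : (PySem.Chars.splitOn s.toList ['_']).head? =
      some (s.toList.takeWhile (fun c => c != '_')) := by
    have := pv_go_head (s.toList.length + 1) s.toList [] (by omega)
    simpa [PySem.Chars.splitOn] using this
  rcases hx : PySem.Chars.splitOn s.toList ['_'] with _ | ⟨t, ts⟩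
  · rw [hx] at hgo; simp at hgo
  · rw [hx] at hgo
    simp only [List.head?_cons, Option.some.injEq] at hgo
    simp [hgo]

theorem pv_underscore_notin_pvDev (s : String) : '_' ∉ (pvDev s).toList := by
  rw [pvDev_eq]
  intro hm
  rw [String.toList_ofList] at hm
  have := List.mem_takeWhile_imp hm
  simp at this

theorem pvBuild_append (m : List String) (i : String) :
    pvBuild (m ++ [i]) = pvStepB (pvBuild m) i := by
  unfold pvBuild
  rw [List.foldl_append]
  rfl

theorem pvC_getD (m : List String) (d : String) :
    (pvBuild m).2.getD d 0 = (((m.map pvDev).count d : ℕ) : Int) := by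
  induction m using List.reverseRecOn with
  | nil => simp [pvBuild, PySem.Dict.getD_empty]
  | append_singleton m i ih =>
    rw [pvBuild_append]
    show ((pvBuild m).2.insert (pvDev i) ((pvBuild m).2.getD (pvDev i) 0 + 1)).getD d 0 = _
    rw [PySem.Dict.getD_insert]
    by_cases hd : d = pvDev i
    · subst hd
      rw [if_pos rfl, ih, List.map_append, List.count_append, List.map_singleton]
      have h1 : [pvDev i].count (pvDev i) = 1 := by simp
      rw [h1]
      push_cast
      ring
    · rw [if_neg hd, ih, List.map_append, List.count_append, List.map_singleton]
      have h0 : [pvDev i].count d = 0 := by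
        simp [List.count_singleton]
        exact fun he => hd he.symm
      rw [h0]
      push_cast
      ring

theorem pvT_stable (m : List String) (i j : String) (hj : j ≠ i) :
    (pvBuild (m ++ [i])).1.getD j "" = (pvBuild m).1.getD j "" := by
  rw [pvBuild_append]
  show ((pvBuild m).1.insert i _).getD j "" = _
  rw [PySem.Dict.getD_insert, if_neg hj]

theorem pvT_self (m : List String) (i : String) :
    (pvBuild (m ++ [i])).1.getD i "" = pvEnc (pvDev i) ((pvBuild m).2.getD (pvDev i) 0) := by
  rw [pvBuild_append]
  show ((pvBuild m).1.insert i _).getD i "" = _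
  rw [PySem.Dict.getD_insert_self]

theorem pvT_contains (m : List String) (i : String) :
    (pvBuild m).1.contains i = true ↔ i ∈ m := by
  induction m using List.reverseRecOn with
  | nil => simp [pvBuild, PySem.Dict.contains_empty]
  | append_singleton m j ih =>
    rw [pvBuild_append]
    show ((pvBuild m).1.insert j _).contains i = true ↔ _
    rw [PySem.Dict.contains_insert]
    simp only [Bool.or_eq_true, beq_iff_eq, List.mem_append, List.mem_singleton, ih]
    tauto

theorem pv_labels_mem (m : List String) (hm : m.Nodup) (d : String) (hd : '_' ∉ d.toList)
    (n : ℕ) :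
    pvEnc d (n : Int) ∈ m.map (fun j => (pvBuild m).1.getD j "") ↔
      ((n : ℕ) : Int) < (pvBuild m).2.getD d 0 := by
  induction m using List.reverseRecOn with
  | nil => simp [pvBuild, PySem.Dict.getD_empty]
  | append_singleton m i ih =>
    have hnodup : m.Nodup := (List.nodup_append.mp hm).1
    have hi : i ∉ m := by
      have h := List.nodup_append.mp hm
      exact fun hmem => (h.2.2 i hmem i (List.mem_singleton_self i)) rfl
    have hmap : m.map (fun j => (pvBuild (m ++ [i])).1.getD j "") =
        m.map (fun j => (pvBuild m).1.getD j "") := by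
      apply List.map_congr_left
      intro j hj
      exact pvT_stable m i j (fun he => hi (he ▸ hj))
    have hdev := pv_underscore_notin_pvDev i
    rw [List.map_append, List.map_singleton, hmap, pvT_self, pvC_getD m (pvDev i),
      List.mem_append, List.mem_singleton, ih hnodup, pvC_getD m d, pvC_getD,
      List.map_append, List.count_append, List.map_singleton]
    by_cases hdd : d = pvDev i
    · rw [hdd] at hd ⊢
      have h1 : [pvDev i].count (pvDev i) = 1 := by simp
      rw [h1]
      constructor
      · rintro (h | h)
        · push_cast at h ⊢; omega
        · obtain ⟨-, hn⟩ := pvEnc_inj _ _ _ _ hd hd h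
          omega
      · intro h
        rcases Nat.lt_or_ge n ((m.map pvDev).count (pvDev i)) with hlt | hge
        · exact Or.inl (by push_cast; omega)
        · have hn : n = (m.map pvDev).count (pvDev i) := by omega
          exact Or.inr (by rw [hn])
    · have h0 : [pvDev i].count d = 0 := by
        simp [List.count_singleton]
        exact fun he => hdd he.symm
      rw [h0]
      constructor
      · rintro (h | h)
        · push_cast at h ⊢; omega
        · obtain ⟨he, -⟩ := pvEnc_inj d (pvDev i) n ((m.map pvDev).count (pvDev i)) hd hdev h
          exact absurd he hdd
      · intro h
        push_cast at h ⊢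
        exact Or.inl (by omega)

theorem pvFindFree_spec (used : PySem.Set String) (d : String) (c : ℕ)
    (hmem : ∀ j : ℕ, j < c → PySem.Set.contains used (pvEnc d (j : Int)) = true)
    (hfree : PySem.Set.contains used (pvEnc d (c : Int)) = false) :
    ∀ (fuel k : ℕ), k ≤ c → c - k < fuel → pvFindFree used d (k : Int) fuel = pvEnc d (c : Int) := by
  intro fuel
  induction fuel with
  | zero => intro k _ h; omega
  | succ fuel ih =>
    intro k hk hfuel
    show (if PySem.Set.contains used (pvEnc d (k : Int)) then _ else _) = _
    by_cases hkc : k = c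
    · subst hkc
      rw [hfree]
      simp
    · rw [hmem k (by omega)]
      simp only [if_true]
      have : ((k : Int) + 1) = ((k + 1 : ℕ) : Int) := by push_cast; ring
      rw [this]
      exact ih (k + 1) (by omega) (by omega)

theorem pv_main (l : List String) :
    l.foldl pvStepA ([], PySem.Dict.empty, PySem.Set.empty) =
      (l.map (fun j => (pvBuild (PySem.List.dedup l)).1.getD j ""),
       (pvBuild (PySem.List.dedup l)).1,
       (PySem.List.dedup l).map (fun j => (pvBuild (PySem.List.dedup l)).1.getD j "")) := by
  induction l using List.reverseRecOn with
  | nil => rfl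
  | append_singleton l i ih =>
    rw [List.foldl_append, List.foldl_cons, List.foldl_nil, ih]
    by_cases hmem : i ∈ l
    · have hded : PySem.List.dedup (l ++ [i]) = PySem.List.dedup l := by
        rw [PySem.List.dedup_eq_ofList, PySem.Set.ofList_append_singleton,
          PySem.Set.add_of_mem (by rw [← PySem.List.dedup_eq_ofList, PySem.List.mem_dedup]; exact hmem)]
        rw [PySem.List.dedup_eq_ofList]
      have hcont : (pvBuild (PySem.List.dedup l)).1.contains i = true :=
        (pvT_contains _ i).mpr (by rw [PySem.List.mem_dedup]; exact hmem)
      unfold pvStepA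
      rw [hded]
      simp only [hcont, if_true]
      rw [List.map_append, List.map_singleton]
    · have hni : i ∉ PySem.List.dedup l := by rw [PySem.List.mem_dedup]; exact hmem
      have hded : PySem.List.dedup (l ++ [i]) = PySem.List.dedup l ++ [i] := by
        rw [PySem.List.dedup_eq_ofList, PySem.Set.ofList_append_singleton,
          PySem.Set.add_of_not_mem (by rw [← PySem.List.dedup_eq_ofList]; exact hni),
          ← PySem.List.dedup_eq_ofList]
      have hcont : (pvBuild (PySem.List.dedup l)).1.contains i = false := by
        rw [← Bool.not_eq_true]
        exact fun hc => hni ((pvT_contains _ i).mp hc)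
      have hnodup : (PySem.List.dedup l).Nodup := PySem.List.nodup_dedup l
      have hdev := pv_underscore_notin_pvDev i
      -- the label the while loop finds
      set m := PySem.List.dedup l with hm
      set c : ℕ := (m.map pvDev).count (pvDev i) with hc
      set used : PySem.Set String := m.map (fun j => (pvBuild m).1.getD j "") with hu
      have hclen : c ≤ used.length := by
        rw [hc, hu]
        calc (m.map pvDev).count (pvDev i) ≤ (m.map pvDev).length := List.count_le_length
        _ = (m.map (fun j => (pvBuild m).1.getD j "")).length := by simp
      have hfind : pvFindFree used (pvDev i) 0 (used.length + 1) = pvEnc (pvDev i) (c : Int) := by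
        have hmemf : ∀ j : ℕ, j < c → PySem.Set.contains used (pvEnc (pvDev i) (j : Int)) = true := by
          intro j hj
          rw [PySem.Set.contains_eq_listContains]
          simp only [List.contains_iff_mem]  -- may need adjusting
          exact (pv_labels_mem m hnodup (pvDev i) hdev j).mpr (by rw [pvC_getD]; exact_mod_cast hj)
        have hfreef : PySem.Set.contains used (pvEnc (pvDev i) (c : Int)) = false := by
          rw [← Bool.not_eq_true, PySem.Set.contains_eq_listContains]
          simp only [List.contains_iff_mem]
          intro hmm
          have := (pv_labels_mem m hnodup (pvDev i) hdev c).mp hmm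
          rw [pvC_getD, ← hc] at this
          omega
        have := pvFindFree_spec used (pvDev i) c hmemf hfreef (used.length + 1) 0
          (by omega) (by omega)
        simpa using this
      have hgetD : (pvBuild m).2.getD (pvDev i) 0 = (c : Int) := by rw [pvC_getD, hc]
      have hTnew : (pvBuild (m ++ [i])).1 = (pvBuild m).1.insert i (pvEnc (pvDev i) (c : Int)) := by
        have h1 : (pvBuild (m ++ [i])).1 =
            (pvBuild m).1.insert i (pvEnc (pvDev i) ((pvBuild m).2.getD (pvDev i) 0)) := by
          rw [pvBuild_append]; rfl
        rw [h1, hgetD]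
      have hstabL : ∀ j ∈ l, (pvBuild (m ++ [i])).1.getD j "" = (pvBuild m).1.getD j "" :=
        fun j hj => pvT_stable m i j (fun he => hmem (he ▸ hj))
      have hstabM : ∀ j ∈ m, (pvBuild (m ++ [i])).1.getD j "" = (pvBuild m).1.getD j "" :=
        fun j hj => pvT_stable m i j (fun he => hni (he ▸ hj))
      have hfi : (pvBuild (m ++ [i])).1.getD i "" = pvEnc (pvDev i) (c : Int) := by
        rw [pvT_self, hgetD]
      have hnotin : pvEnc (pvDev i) (c : Int) ∉ used := by
        intro hmm
        have := (pv_labels_mem m hnodup (pvDev i) hdev c).mp hmm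
        rw [pvC_getD, ← hc] at this
        omega
      have hstep : pvStepA (l.map (fun j => (pvBuild m).1.getD j ""), (pvBuild m).1, used) i =
          (l.map (fun j => (pvBuild m).1.getD j "") ++ [pvFindFree used (pvDev i) 0 (used.length + 1)],
           (pvBuild m).1.insert i (pvFindFree used (pvDev i) 0 (used.length + 1)),
           PySem.Set.add used (pvFindFree used (pvDev i) 0 (used.length + 1))) := by
        simp only [pvStepA, hcont, Bool.false_eq_true, if_false]
      rw [hstep, hfind, hded]
      simp only [Prod.mk.injEq]
      refine ⟨?_, ?_, ?_⟩
      · rw [List.map_append, List.map_singleton, hfi, List.map_congr_left hstabL]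
      · rw [hTnew]
      · rw [PySem.Set.add_of_not_mem hnotin, List.map_append, List.map_singleton, hfi,
          List.map_congr_left hstabM]

-- ===== VERDICT (by name: the statement is the Claim_ definition above) =====
theorem assignment_renaming_spec : Claim_equal_assignment_renaming := by
  intro assignment _
  unfold Spec_assignment_renaming assignment_renaming assignment_renaming_alt
  rw [pv_main]
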